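-- pv_equiv track=rewrite | github.com/christofmuc/KnobKraft-orm | adaptions/PioneerToraiz-AS1.py | unescapeSysex
-- ===== SOURCE A (Python) =====
-- def unescapeSysex(sysex):
--     """Unpacks a 7-bit sysex message into 8-bit bytes."""
--     result = []
--     dataIndex = 0
--     while dataIndex < len(sysex):
--         msbits = sysex[dataIndex]
--         dataIndex += 1
--         for i in range(7):
--             if dataIndex < len(sysex):
--                 result.append(sysex[dataIndex] | (
--                     (msbits & (1 << i)) << (7 - i)))
--             dataIndex += 1
--     return result
-- ===== SOURCE B (Python) =====
-- def unescapeSysex(sysex):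
--     """Unpacks a 7-bit sysex message into 8-bit bytes."""
--     result = []
--     bits = 0
--     pending = 0  # data bytes still expected from the current chunk
--     for x in sysex:
--         if pending == 0:
--             bits = x
--             pending = 7
--         else:
--             result.append(x | ((bits & 1) << 7))
--             bits >>= 1
--             pending -= 1
--     return result
-- ===== Notes on version B (the rewrite author's own statement) =====
-- stated objective: alternative
-- what changed: Replaces A's nested loops (flat cursor + per-position mask (msbits & (1<<i)) << (7-i) with a bounds check on each of the 7 inner iterations) by a single streaming pass over the elements with a (bits, pending) state machine that emits x | ((bits & 1) << 7) and right-shifts the accumulator once per data byte.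
import Mathlib
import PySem

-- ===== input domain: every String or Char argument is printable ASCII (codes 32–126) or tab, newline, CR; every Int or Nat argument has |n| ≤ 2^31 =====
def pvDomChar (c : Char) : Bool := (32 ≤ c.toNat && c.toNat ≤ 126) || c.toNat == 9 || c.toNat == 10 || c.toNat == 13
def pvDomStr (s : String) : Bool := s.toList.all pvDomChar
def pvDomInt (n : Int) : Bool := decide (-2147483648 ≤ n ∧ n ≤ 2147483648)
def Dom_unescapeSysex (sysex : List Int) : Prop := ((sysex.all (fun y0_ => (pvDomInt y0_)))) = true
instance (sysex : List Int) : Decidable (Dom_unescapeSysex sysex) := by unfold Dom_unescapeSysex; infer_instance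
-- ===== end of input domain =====

-- B replaces A's nested index-walking loops with positional bit masks by a single
-- streaming pass: a (bits, pending) state machine that extracts the low bit of a
-- right-shifting msbits accumulator; alternative decomposition, same cost.


-- ===== PORT A =====
-- inner 'for i in range(7)' of A, over the state (result, dataIndex)
def pvAInner (sysex : List Int) (msbits : Int) (st : List Int × Nat) : List Int × Nat :=
  (PySem.List.pyRange 0 7 1).foldl (fun st i =>
    (if st.2 < sysex.length then
        st.1 ++ [PySem.Int.bor (sysex.getD st.2 0)
                  ((PySem.Int.band msbits (1 <<< i.toNat)) <<< ((7 - i.toNat : Nat)))]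
      else st.1, st.2 + 1)) st

-- the inner loop always advances dataIndex by 7 (used for termination of the while loop)
lemma pvAInner_snd (sysex : List Int) (m : Int) (st : List Int × Nat) :
    (pvAInner sysex m st).2 = st.2 + 7 := by
  have h : PySem.List.pyRange 0 7 1 = [0, 1, 2, 3, 4, 5, 6] := by decide
  simp [pvAInner, h, List.foldl]

-- A's 'while dataIndex < len(sysex)' loop
def pvALoop (sysex : List Int) (result : List Int) (d : Nat) : List Int :=
  if _h : d < sysex.length then
    pvALoop sysex (pvAInner sysex (sysex.getD d 0) (result, d + 1)).1
                  (pvAInner sysex (sysex.getD d 0) (result, d + 1)).2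
  else result
termination_by sysex.length - d
decreasing_by simp [pvAInner_snd]; omega

def unescapeSysex (sysex : List Int) : List Int := pvALoop sysex [] 0

-- ===== PORT B =====
-- B is a single fold over the elements with state (result, bits, pending).
def unescapeSysex_alt (sysex : List Int) : List Int :=
  (sysex.foldl
    (fun (st : List Int × Int × Int) x =>
      if st.2.2 == 0 then (st.1, x, 7)
      else (st.1 ++ [PySem.Int.bor x ((PySem.Int.band st.2.1 1) <<< (7:Nat))],
            st.2.1 >>> (1:Nat), st.2.2 - 1))
    ([], 0, 0)).1

-- ===== PRECONDITION & SPEC =====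
def Spec_unescapeSysex (sysex : List Int) (out : List Int) : Prop := out = unescapeSysex_alt sysex
instance (sysex : List Int) (out : List Int) : Decidable (Spec_unescapeSysex sysex out) := by unfold Spec_unescapeSysex; infer_instance

-- ===== CLAIM (what is proved, stated in full; the proofs are below) =====
def Claim_equal_unescapeSysex : Prop := ∀ (sysex : List Int), Dom_unescapeSysex sysex → Spec_unescapeSysex sysex (unescapeSysex sysex)

-- ===== LEMMAS AND PROOFS =====

-- the byte A emits for data byte jb.2 at chunk position jb.1 under msbits m
def pvDec (m : Int) (jb : Int × Int) : Int :=
  PySem.Int.bor jb.2 ((PySem.Int.band m (1 <<< jb.1.toNat)) <<< ((7 - jb.1.toNat : Nat)))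

-- common characterisation: process the list one 8-byte chunk at a time
def pvChunks : List Int → List Int
  | [] => []
  | m :: rest =>
      (PySem.List.enumerate (rest.take 7)).map (pvDec m) ++ pvChunks (rest.drop 7)
termination_by l => l.length
decreasing_by simp

lemma pvAInner_gen (sysex : List Int) (m : Int) (n : Nat) (r : List Int) (e : Nat) :
    (PySem.List.pyRange 0 (n : Int) 1).foldl (fun st i =>
      (if st.2 < sysex.length then
          st.1 ++ [PySem.Int.bor (sysex.getD st.2 0)
                    ((PySem.Int.band m (1 <<< i.toNat)) <<< ((7 - i.toNat : Nat)))]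
        else st.1, st.2 + 1)) (r, e)
    = (r ++ (PySem.List.enumerate ((sysex.drop e).take n)).map (pvDec m), e + n) := by
  induction n with
  | zero =>
    rw [PySem.List.pyRange_one_eq_nil (by simp)]
    simp
  | succ n ih =>
    have hc : ((n + 1 : Nat) : Int) = (n : Int) + 1 := by push_cast; ring
    rw [hc, PySem.List.pyRange_one_succ_right (by positivity), List.foldl_append, ih]
    simp only [List.foldl]
    by_cases h : e + n < sysex.length
    · have hlt : (n : Nat) < (sysex.drop e).length := by simp; omega
      have htake : (sysex.drop e).take (n + 1)
          = (sysex.drop e).take n ++ [(sysex.drop e)[n]] := by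
        rw [List.take_add_one]
        simp [List.getElem?_eq_getElem hlt]
      have hlen : ((sysex.drop e).take n).length = n := by simp; omega
      have hget : (sysex.drop e)[n]'hlt = sysex.getD (e + n) 0 := by
        rw [List.getElem_drop, List.getD_eq_getElem _ _ (by omega)]
      rw [htake, PySem.List.enumerate_append]
      simp [h, hlen, pvDec, hget, Nat.add_assoc, Int.toNat_natCast]
    · have htake : (sysex.drop e).take (n + 1) = (sysex.drop e).take n := by
        have hle : (sysex.drop e).length ≤ n := by simp; omega
        rw [List.take_of_length_le hle, List.take_of_length_le (by omega)]
      simp [h, htake, Nat.add_assoc]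

lemma pvAInner_spec (sysex : List Int) (m : Int) (r : List Int) (e : Nat) :
    pvAInner sysex m (r, e)
      = (r ++ (PySem.List.enumerate ((sysex.drop e).take 7)).map (pvDec m), e + 7) := by
  have h := pvAInner_gen sysex m 7 r e
  simpa [pvAInner] using h

lemma pvALoop_spec (sysex : List Int) (d : Nat) (r : List Int) :
    pvALoop sysex r d = r ++ pvChunks (sysex.drop d) := by
  rw [pvALoop]
  by_cases h : d < sysex.length
  · simp only [h, dif_pos]
    have hgd : sysex.getD d 0 = sysex[d] := List.getD_eq_getElem _ _ h
    have hrec := pvALoop_spec sysex (d + 1 + 7)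
        (r ++ (PySem.List.enumerate ((sysex.drop (d + 1)).take 7)).map (pvDec (sysex.getD d 0)))
    simp only [pvAInner_spec]
    rw [hrec, hgd]
    have hdrop : sysex.drop d = sysex[d] :: sysex.drop (d + 1) :=
      List.drop_eq_getElem_cons h
    rw [hdrop]
    simp only [pvChunks]
    simp [List.drop_drop]
  · simp only [h, dif_neg, not_false_iff]
    rw [List.drop_of_length_le (by omega)]
    simp only [pvChunks]
    simp
termination_by sysex.length - d
decreasing_by omega

-- m & 2^j isolates bit j: it equals ((m >> j) mod 2) shifted back up — for every
-- Int m, including negatives (Python's infinite two's complement)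
lemma pvBand_two_pow (m : Int) (j : Nat) :
    PySem.Int.band m (((1 <<< j : Nat) : Int)) = ((m >>> j) % 2) <<< j := by
  rw [Nat.one_shiftLeft, Int.shiftRight_eq_div_pow, Int.shiftLeft_eq]
  by_cases hm : 0 ≤ m
  · obtain ⟨n, rfl⟩ : ∃ n : Nat, m = (n : Int) := ⟨m.toNat, (Int.toNat_of_nonneg hm).symm⟩
    rw [PySem.Int.band_natCast, Nat.and_two_pow]
    have hdiv : ((n : Int)) / ((2^j : Nat) : Int) = ((n / 2^j : Nat) : Int) := by norm_cast
    rw [hdiv]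
    have hmod : (((n / 2^j : Nat) : Int)) % 2 = ((n / 2^j % 2 : Nat) : Int) := by norm_cast
    rw [hmod, Nat.toNat_testBit]
    push_cast; ring
  · have hb : (0:Int) ≤ ((2^j : Nat) : Int) := by positivity
    simp only [PySem.Int.band, if_neg hm, if_pos hb]
    set k : Nat := (-m - 1).toNat with hkdef
    have hmk : m = -(k : Int) - 1 := by
      have : ((-m - 1).toNat : Int) = -m - 1 := Int.toNat_of_nonneg (by omega)
      omega
    have htn : ((2^j : Nat) : Int).toNat = 2^j := Int.toNat_natCast _
    rw [hmk, htn]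
    set q : Nat := k / 2^j with hq
    set r : Nat := k % 2^j with hr
    have hkNat : q * 2^j + r = k := by rw [hq, hr, Nat.mul_comm]; exact Nat.div_add_mod k (2^j)
    have hk : (k : Int) = (q : Int) * ((2^j : Nat) : Int) + (r : Int) := by exact_mod_cast hkNat.symm
    have hrlt : r < 2^j := Nat.mod_lt _ (by positivity)
    have hrltI : (r:Int) < ((2^j : Nat) : Int) := by exact_mod_cast hrlt
    have hPpos : (0:Int) < ((2^j : Nat) : Int) := by positivity
    have hdiv : (-(k:Int) - 1) / ((2^j : Nat) : Int) = -(q:Int) - 1 := by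
      have hrw : (-(k:Int) - 1) = (((2^j : Nat) : Int) - 1 - (r:Int)) + (-(q:Int) - 1) * ((2^j : Nat) : Int) := by
        rw [hk]; ring
      rw [hrw, Int.add_mul_ediv_right _ _ (by positivity),
          Int.ediv_eq_zero_of_lt (by omega) (by omega)]
      ring
    rw [hdiv]
    have hand : 2^j &&& k = (q % 2) * 2^j := by
      rw [Nat.and_comm, Nat.and_two_pow, Nat.toNat_testBit]
    rw [hand]
    have hmod2 : (-(q:Int) - 1) % 2 = 1 - ((q % 2 : Nat) : Int) := by
      rcases Nat.mod_two_eq_zero_or_one q with h2 | h2 <;> omega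
    rw [hmod2]
    rcases Nat.mod_two_eq_zero_or_one q with h2 | h2 <;> simp [h2]

-- B's lowest-bit-of-shifted-accumulator byte equals A's masked byte (j ≤ 7)
lemma pvBit_eq (b m : Int) (j : Nat) (hj : j ≤ 7) :
    PySem.Int.bor b ((PySem.Int.band (m >>> j) 1) <<< (7:Nat))
      = PySem.Int.bor b ((PySem.Int.band m (((1 <<< j : Nat) : Int))) <<< (7 - j)) := by
  rw [pvBand_two_pow, PySem.Int.band_one,
      PySem.Int.mod_eq_emod_of_pos (by norm_num : (0:Int) < 2),
      ← Int.shiftLeft_add, Nat.add_sub_cancel' hj]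

-- the byte B emits for data byte b after j right-shifts of the accumulator
def pvDec' (m : Int) (j : Nat) (b : Int) : Int :=
  PySem.Int.bor b ((PySem.Int.band (m >>> j) 1) <<< (7:Nat))

-- shifting the enumeration start is shifting the accumulator
lemma pvMapShift (t : List Int) (m : Int) (s : Nat) :
    (PySem.List.enumerate t (s : Int)).map (fun jb => pvDec' m jb.1.toNat jb.2)
    = (PySem.List.enumerate t 0).map (fun jb => pvDec' (m >>> s) jb.1.toNat jb.2) := by
  induction t generalizing m s with
  | nil => simp
  | cons x t ih =>
    rw [PySem.List.enumerate_cons, PySem.List.enumerate_cons]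
    simp only [List.map_cons]
    have hc : ((s : Int) + 1) = ((s + 1 : Nat) : Int) := by push_cast; ring
    have hc1 : ((0 : Int) + 1) = ((1 : Nat) : Int) := by norm_num
    have htail : m >>> (s + 1) = (m >>> s) >>> (1 : Nat) := Int.shiftRight_add m s 1
    rw [hc, ih m (s + 1), hc1, ih (m >>> s) 1, htail]
    simp [pvDec']

-- B's chunk output equals A's: the accumulator's low bit after j shifts is bit j
lemma pvChunkMap (m : Int) (t : List Int) :
    (PySem.List.enumerate (t.take 7)).map (fun jb => pvDec' m jb.1.toNat jb.2)
    = (PySem.List.enumerate (t.take 7)).map (pvDec m) := by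
  apply List.map_congr_left
  intro jb hjb
  rw [PySem.List.mem_enumerate_iff] at hjb
  obtain ⟨k, hk, rfl⟩ := hjb
  have hk7 : k ≤ 7 := by
    have := List.length_take_le 7 t
    omega
  have h0 : (((0 : Int)) + (k : Int)) = (k : Int) := by ring
  rw [h0]
  simp only [pvDec, pvDec', Int.toNat_natCast]
  exact pvBit_eq _ m k hk7

-- invariant of B's fold: with p bytes pending under accumulator m, the rest of the
-- current chunk is decoded with pvDec', then whole chunks follow
lemma pvBFold (l : List Int) (r : List Int) (m : Int) (p : Nat) (hp : p ≤ 7) :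
    ((l.foldl
      (fun (st : List Int × Int × Int) x =>
        if st.2.2 == 0 then (st.1, x, 7)
        else (st.1 ++ [PySem.Int.bor x ((PySem.Int.band st.2.1 1) <<< (7:Nat))],
              st.2.1 >>> (1:Nat), st.2.2 - 1))
      (r, m, (p : Int))).1)
    = r ++ (PySem.List.enumerate (l.take p)).map (fun jb => pvDec' m jb.1.toNat jb.2)
        ++ pvChunks (l.drop p) := by
  induction l generalizing r m p with
  | nil => simp [pvChunks]
  | cons x t ih =>
    simp only [List.foldl_cons]
    match p with
    | 0 =>
      simp only [Nat.cast_zero, beq_self_eq_true, if_pos]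
      have h := ih r x 7 (by omega)
      push_cast at h
      rw [h]
      simp only [List.take_zero, List.drop_zero]
      rw [pvChunks, pvChunkMap]
      simp
    | Nat.succ q =>
      rw [if_neg (by simp only [beq_iff_eq]; push_cast; omega)]
      have hq : ((q.succ : Nat) : Int) - 1 = ((q : Nat) : Int) := by push_cast; ring
      rw [hq, ih _ _ q (by omega)]
      simp only [List.take_succ_cons, List.drop_succ_cons, PySem.List.enumerate_cons,
        List.map_cons]
      have hc1 : ((0 : Int) + 1) = ((1 : Nat) : Int) := by norm_num
      rw [hc1, pvMapShift (t.take q) m 1]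
      have hhead : PySem.Int.bor x ((PySem.Int.band m 1) <<< (7:Nat))
          = pvDec' m ((0 : Int)).toNat x := by
        simp [pvDec']
      simp [hhead]

lemma pvB_eq_chunks (l : List Int) : unescapeSysex_alt l = pvChunks l := by
  rw [unescapeSysex_alt]
  have h := pvBFold l [] 0 0 (by omega)
  simpa using h

-- ===== VERDICT (by name: the statement is the Claim_ definition above) =====
theorem unescapeSysex_spec : Claim_equal_unescapeSysex := by
  intro sysex _
  unfold Spec_unescapeSysex unescapeSysex
  rw [pvALoop_spec, pvB_eq_chunks]
  simp
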